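-- pv_equiv track=rewrite | github.com/banditburai/opentui-python | src/opentui/components/markdown/markdown_parser.py | _parse_table_cells
-- ===== SOURCE A (Python) =====
-- from typing import Any
--
-- def _parse_table_cells(row_text: str) -> list[dict[str, Any]]:
--     """Split a table row into cells, returning marked-style cell dicts.
--
--     Handles escaped pipes (``\\|``) so they are kept as literal ``|``
--     characters inside a cell rather than treated as column separators.
--     """
--     stripped = row_text.strip()
--     if stripped.startswith("|"):
--         stripped = stripped[1:]
--     if stripped.endswith("|"):
--         stripped = stripped[:-1]
--
--     # Split respecting escaped pipes
--     cells: list[str] = []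
--     current: list[str] = []
--     i = 0
--     while i < len(stripped):
--         if stripped[i] == "\\" and i + 1 < len(stripped) and stripped[i + 1] == "|":
--             current.append("|")
--             i += 2
--         elif stripped[i] == "|":
--             cells.append("".join(current))
--             current = []
--             i += 1
--         else:
--             current.append(stripped[i])
--             i += 1
--     cells.append("".join(current))
--     return [{"text": c.strip()} for c in cells]
-- ===== SOURCE B (Python) =====
-- def _parse_table_cells(row_text: str) -> list:
--     """Split a table row into cells: sentinel substitution + str.split instead of a char loop."""
--     stripped = row_text.strip()
--     if stripped.startswith("|"):
--         stripped = stripped[1:]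
--     if stripped.endswith("|"):
--         stripped = stripped[:-1]
--     # "\x00" cannot occur in the (printable) markdown text, so it is a safe
--     # stand-in for escaped pipes while splitting on the remaining separators.
--     encoded = stripped.replace("\\|", "\x00")
--     return [{"text": part.replace("\x00", "|").strip()} for part in encoded.split("|")]
-- ===== Notes on version B (the rewrite author's own statement) =====
-- stated objective: faster
-- what changed: A's explicit char-by-char escape-tracking state machine is replaced by three whole-string passes: substitute a sentinel for every escaped pipe (str.replace), split on the remaining pipes (str.split), then decode the sentinel back per cell.
import Mathlib
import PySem

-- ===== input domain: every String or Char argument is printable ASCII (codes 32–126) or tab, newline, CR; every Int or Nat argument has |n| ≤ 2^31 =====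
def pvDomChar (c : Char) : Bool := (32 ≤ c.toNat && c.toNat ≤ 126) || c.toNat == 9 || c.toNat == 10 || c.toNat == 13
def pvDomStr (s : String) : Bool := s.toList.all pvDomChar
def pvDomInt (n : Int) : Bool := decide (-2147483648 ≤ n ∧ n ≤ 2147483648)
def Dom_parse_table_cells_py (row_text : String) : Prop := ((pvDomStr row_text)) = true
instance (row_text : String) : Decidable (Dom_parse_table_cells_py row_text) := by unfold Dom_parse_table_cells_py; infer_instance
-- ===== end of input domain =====

-- B replaces A's explicit escape-tracking character loop by a sentinel substitution
-- ("\|" -> "\x00"), a plain split on "|" and a per-cell decode (measured faster: C-level str passes).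

-- ===== PORT A =====
-- the while-loop of A: walks the chars, tracking the current cell and finished cells
def pvAScan : List Char → List Char → List (List Char) → List (List Char)
  | [], current, cells => cells ++ [current]
  | '\\' :: '|' :: rest, current, cells => pvAScan rest (current ++ ['|']) cells
  | '|' :: rest, current, cells => pvAScan rest [] (cells ++ [current])
  | c :: rest, current, cells => pvAScan rest (current ++ [c]) cells

def parse_table_cells_py (row_text : String) : List (List (String × String)) :=
  let stripped := PySem.Str.strip row_text
  let stripped := if PySem.Str.startswith stripped "|" then PySem.Str.slice stripped (some 1) none else stripped
  let stripped := if PySem.Str.endswith stripped "|" then PySem.Str.slice stripped none (some (-1)) else stripped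
  (pvAScan stripped.toList [] []).map (fun c => [("text", String.ofList (PySem.Chars.strip c))])

-- ===== PORT B =====
def parse_table_cells_py_alt (row_text : String) : List (List (String × String)) :=
  let stripped := PySem.Str.strip row_text
  let stripped := if PySem.Str.startswith stripped "|" then PySem.Str.slice stripped (some 1) none else stripped
  let stripped := if PySem.Str.endswith stripped "|" then PySem.Str.slice stripped none (some (-1)) else stripped
  let encoded := PySem.Chars.replace stripped.toList ['\\', '|'] ['\x00']
  (PySem.Chars.splitOn encoded ['|']).map
    (fun part => [("text", String.ofList (PySem.Chars.strip (PySem.Chars.replace part ['\x00'] ['|'])))])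

-- ===== PRECONDITION & SPEC =====
def Spec_parse_table_cells_py (row_text : String) (out : List (List (String × String))) : Prop := out = parse_table_cells_py_alt row_text
instance (row_text : String) (out : List (List (String × String))) : Decidable (Spec_parse_table_cells_py row_text out) := by unfold Spec_parse_table_cells_py; infer_instance

-- ===== CLAIM (what is proved, stated in full; the proofs are below) =====
def Claim_equal_parse_table_cells_py : Prop := ∀ (row_text : String), Dom_parse_table_cells_py row_text → Spec_parse_table_cells_py row_text (parse_table_cells_py row_text)

-- ===== LEMMAS AND PROOFS =====

-- spec-side recursions mirroring B's three C-level passes (used only in proofs)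
def pvE : List Char → List Char
  | [] => []
  | [c] => [c]
  | c :: d :: rest => if c = '\\' ∧ d = '|' then '\x00' :: pvE rest else c :: pvE (d :: rest)

def pvU : List Char → List Char
  | [] => []
  | c :: rest => if c = '\x00' then '|' :: pvU rest else c :: pvU rest

def pvS : List Char → List (List Char)
  | [] => [[]]
  | c :: rest => if c = '|' then [] :: pvS rest else (pvS rest).modifyHead (c :: ·)

lemma pvS_ne_nil (cs : List Char) : pvS cs ≠ [] := by
  induction cs with
  | nil => simp [pvS]
  | cons c rest ih =>
    rw [pvS]
    split
    · simp
    · obtain ⟨p, ps, hps⟩ := List.exists_cons_of_ne_nil ih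
      simp [hps]

lemma esc_prefix_iff (c : Char) (t : List Char) :
    List.isPrefixOf ['\\', '|'] (c :: t) = true ↔ c = '\\' ∧ ∃ t', t = '|' :: t' := by
  cases t with
  | nil => simp [List.isPrefixOf]
  | cons d t' =>
    simp only [List.isPrefixOf, Bool.and_eq_true, beq_iff_eq]
    constructor
    · rintro ⟨h1, h2, -⟩; exact ⟨h1.symm, t', by rw [h2]⟩
    · rintro ⟨rfl, t'', ht⟩
      injection ht with h1 h2; subst h1; subst h2; simp

lemma replace_esc_go (fuel : Nat) (l acc : List Char) (h : l.length ≤ fuel) :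
    PySem.Chars.replace.go ['\\', '|'] ['\x00'] fuel l acc = acc.reverse ++ pvE l := by
  induction fuel generalizing l acc with
  | zero =>
    have hl : l = [] := by cases l <;> simp_all
    subst hl; simp [PySem.Chars.replace.go, pvE]
  | succ fuel ih =>
    cases l with
    | nil => simp [PySem.Chars.replace.go, pvE]
    | cons c t =>
      rw [PySem.Chars.replace.go]
      by_cases hp : (List.isPrefixOf ['\\', '|'] (c :: t)) = true
      · obtain ⟨rfl, t', rfl⟩ := (esc_prefix_iff c t).mp hp
        rw [if_pos hp]
        rw [show List.drop (List.length ['\\', '|']) ('\\' :: '|' :: t') = t' from rfl]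
        rw [ih t' _ (by simp at h ⊢; omega)]
        simp [pvE]
      · rw [if_neg hp]
        rw [ih t _ (by simp at h ⊢; omega)]
        have hno : ¬(c = '\\' ∧ ∃ t', t = '|' :: t') := by
          rw [← esc_prefix_iff]; simpa using hp
        cases t with
        | nil => simp [pvE]
        | cons d t' =>
          have : ¬(c = '\\' ∧ d = '|') := fun ⟨h1, h2⟩ => hno ⟨h1, t', by rw [h2]⟩
          rw [pvE, if_neg this]
          simp

lemma replace_esc (l : List Char) : PySem.Chars.replace l ['\\', '|'] ['\x00'] = pvE l := by
  rw [PySem.Chars.replace]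
  simpa using replace_esc_go l.length l [] le_rfl

lemma replace_nul_go (fuel : Nat) (l acc : List Char) (h : l.length ≤ fuel) :
    PySem.Chars.replace.go ['\x00'] ['|'] fuel l acc = acc.reverse ++ pvU l := by
  induction fuel generalizing l acc with
  | zero =>
    have hl : l = [] := by cases l <;> simp_all
    subst hl; simp [PySem.Chars.replace.go, pvU]
  | succ fuel ih =>
    cases l with
    | nil => simp [PySem.Chars.replace.go, pvU]
    | cons c t =>
      rw [PySem.Chars.replace.go]
      have hp : (List.isPrefixOf ['\x00'] (c :: t)) = (c == '\x00') := by
        simp [List.isPrefixOf, eq_comm]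
      by_cases hc : c = '\x00'
      · subst hc
        rw [if_pos (by simp [hp])]
        rw [show List.drop (List.length ['\x00']) ('\x00' :: t) = t from rfl]
        rw [ih t _ (by simp at h ⊢; omega)]
        rw [pvU, if_pos rfl]
        simp
      · rw [if_neg (by simp [hp, hc])]
        rw [ih t _ (by simp at h ⊢; omega)]
        rw [pvU, if_neg hc]
        simp

lemma replace_nul (l : List Char) : PySem.Chars.replace l ['\x00'] ['|'] = pvU l := by
  rw [PySem.Chars.replace]
  simpa using replace_nul_go l.length l [] le_rfl

lemma splitOn_go (fuel : Nat) (l cur : List Char) (acc : List (List Char)) (h : l.length ≤ fuel) :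
    PySem.Chars.splitOn.go ['|'] fuel l cur acc
      = acc.reverse ++ (pvS l).modifyHead (cur.reverse ++ ·) := by
  induction fuel generalizing l cur acc with
  | zero =>
    have hl : l = [] := by cases l <;> simp_all
    subst hl; simp [PySem.Chars.splitOn.go, pvS]
  | succ fuel ih =>
    cases l with
    | nil => simp [PySem.Chars.splitOn.go, pvS]
    | cons c t =>
      rw [PySem.Chars.splitOn.go]
      have hp : (List.isPrefixOf ['|'] (c :: t)) = (c == '|') := by
        simp [List.isPrefixOf, eq_comm]
      by_cases hc : c = '|'
      · subst hc
        rw [if_pos (by simp [hp])]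
        rw [show List.drop (List.length ['|']) ('|' :: t) = t from rfl]
        rw [ih t [] _ (by simp at h ⊢; omega)]
        rw [pvS, if_pos rfl]
        simp [show (fun x : List Char => x) = id from rfl, List.modifyHead_id]
      · rw [if_neg (by simp [hp, hc])]
        rw [ih t (c :: cur) acc (by simp at h ⊢; omega)]
        rw [pvS, if_neg hc]
        obtain ⟨p, ps, hps⟩ := List.exists_cons_of_ne_nil (pvS_ne_nil t)
        simp [hps]

lemma splitOn_pipe (l : List Char) : PySem.Chars.splitOn l ['|'] = pvS l := by
  rw [PySem.Chars.splitOn]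
  rw [splitOn_go (l.length + 1) l [] [] (by omega)]
  obtain ⟨p, ps, hps⟩ := List.exists_cons_of_ne_nil (pvS_ne_nil l)
  simp [hps]

lemma aScan_eq (cs cur : List Char) (cells : List (List Char)) (h : '\x00' ∉ cs) :
    pvAScan cs cur cells = cells ++ ((pvS (pvE cs)).map pvU).modifyHead (cur ++ ·) := by
  fun_induction pvAScan cs cur cells with
  | case1 current cells => simp [pvE, pvS, pvU]
  | case2 rest current cells ih =>
    rw [ih (by simp_all)]
    rw [show pvE ('\\' :: '|' :: rest) = '\x00' :: pvE rest from by rw [pvE]; simp]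
    rw [pvS, if_neg (by decide)]
    obtain ⟨p, ps, hps⟩ := List.exists_cons_of_ne_nil (pvS_ne_nil (pvE rest))
    rw [hps]
    simp only [List.modifyHead, List.map, pvU]
    simp
  | case3 rest current cells ih =>
    rw [ih (by simp_all)]
    have hE : pvE ('|' :: rest) = '|' :: pvE rest := by
      cases rest with
      | nil => simp [pvE]
      | cons d t => rw [pvE, if_neg (by simp)]
    rw [hE, pvS, if_pos rfl]
    obtain ⟨p, ps, hps⟩ := List.exists_cons_of_ne_nil (pvS_ne_nil (pvE rest))
    simp [hps, pvU]
  | case4 c rest current cells h1 h2 ih =>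
    have hc0 : c ≠ '\x00' := by intro hh; exact h (by simp [hh])
    rw [ih (fun hm => h (List.mem_cons_of_mem _ hm))]
    have hE : pvE (c :: rest) = c :: pvE rest := by
      cases rest with
      | nil => simp [pvE]
      | cons d t =>
        rw [pvE, if_neg (fun hcd => h1 t hcd.1 (by rw [hcd.2]))]
    rw [hE, pvS, if_neg (fun hh => h2 hh)]
    obtain ⟨p, ps, hps⟩ := List.exists_cons_of_ne_nil (pvS_ne_nil (pvE rest))
    rw [hps]
    simp [List.modifyHead, pvU, hc0]

-- membership chasers: strip and slice only keep characters of their input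
lemma mem_of_mem_strip {c : Char} {l : List Char} (h : c ∈ PySem.Chars.strip l) : c ∈ l := by
  simp only [PySem.Chars.strip, PySem.Chars.rstrip, PySem.Chars.lstrip] at h
  rw [List.mem_reverse] at h
  have h2 := (List.dropWhile_sublist _).mem h
  rw [List.mem_reverse] at h2
  exact (List.dropWhile_sublist _).mem h2

lemma mem_of_mem_slice {c : Char} {l : List Char} {a b : Option Int}
    (h : c ∈ PySem.List.slice l a b) : c ∈ l := by
  simp only [PySem.List.slice] at h
  exact (List.drop_sublist _ _).mem ((List.take_sublist _ _).mem h)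

-- ===== VERDICT (by name: the statement is the Claim_ definition above) =====
theorem parse_table_cells_py_spec : Claim_equal_parse_table_cells_py := by
  intro row_text hdom
  unfold Spec_parse_table_cells_py
  simp only [parse_table_cells_py, parse_table_cells_py_alt]
  set s1 := PySem.Str.strip row_text with hs1
  set s2 := if PySem.Str.startswith s1 "|" then PySem.Str.slice s1 (some 1) none else s1 with hs2
  set s3 := if PySem.Str.endswith s2 "|" then PySem.Str.slice s2 none (some (-1)) else s2 with hs3
  have m1 : ∀ c : Char, c ∈ s1.toList → c ∈ row_text.toList := by
    intro c hc
    rw [hs1] at hc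
    simp only [PySem.Str.strip, String.toList_ofList] at hc
    exact mem_of_mem_strip hc
  have m2 : ∀ c : Char, c ∈ s2.toList → c ∈ s1.toList := by
    intro c hc
    rw [hs2] at hc
    by_cases hb : PySem.Str.startswith s1 "|"
    · rw [if_pos hb] at hc
      simp only [PySem.Str.toList_slice, PySem.Chars.slice] at hc
      exact mem_of_mem_slice hc
    · rwa [if_neg hb] at hc
  have m3 : ∀ c : Char, c ∈ s3.toList → c ∈ s2.toList := by
    intro c hc
    rw [hs3] at hc
    by_cases hb : PySem.Str.endswith s2 "|"
    · rw [if_pos hb] at hc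
      simp only [PySem.Str.toList_slice, PySem.Chars.slice] at hc
      exact mem_of_mem_slice hc
    · rwa [if_neg hb] at hc
  have hnul : '\x00' ∉ s3.toList := by
    intro hmem
    have hrow : '\x00' ∈ row_text.toList := m1 _ (m2 _ (m3 _ hmem))
    have := List.all_eq_true.mp hdom _ hrow
    simp [pvDomChar] at this
  rw [aScan_eq s3.toList [] [] hnul, replace_esc, splitOn_pipe]
  rw [show (fun (a : List Char) => [] ++ a) = id from funext (fun a => by simp)]
  rw [List.modifyHead_id]
  simp only [replace_nul]
  simp [List.map_map, Function.comp]
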